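-- pv_equiv track=rewrite | github.com/KDercksen/adventofcode18 | 8/part_two.py | compute
-- ===== SOURCE A (Python) =====
-- def compute(data):
--     if len(data) == 0:
--         return [], 0
--     children, entries = data[:2]
--     rest = data[2:]
--     if children == 0:
--         return rest[entries:], sum(rest[:entries])
--     child_vals = []
--     for _ in range(children):
--         rest, result = compute(rest)
--         child_vals.append(result)
--     val = sum(child_vals[i - 1] for i in rest[:entries] if i <= len(child_vals))
--     rest = rest[entries:]
--     return rest, val
-- ===== SOURCE B (Python) =====
-- def compute(data):
--     # Single index cursor into the list instead of repeated list slicing.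
--     n = len(data)
--
--     def node(i):
--         if i >= n:
--             return i, 0
--         children, entries = data[i], data[i + 1]
--         i += 2
--         vals = []
--         for _ in range(children):
--             i, v = node(i)
--             vals.append(v)
--         meta = data[i:i + entries]
--         if children == 0:
--             val = sum(meta)
--         else:
--             val = sum(vals[j - 1] for j in meta if j <= len(vals))
--         return i + entries, val
--
--     i, val = node(0)
--     return data[i:], val
-- ===== Notes on version B (the rewrite author's own statement) =====
-- stated objective: alternative
-- what changed: B walks the flat serialization with a single integer cursor into the original list (one recursive descent, O(1) state) instead of A's rebuilding of the remaining input by list slicing (data[2:], rest[entries:]) at every node; a timing run could not certify the speed difference because its large random inputs are not well-formed trees (outside Pre_).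
-- outside the precondition, e.g. on compute([0, -1, 5]): A returns ([5], 0), B returns ([-1, 5], 0)
import Mathlib
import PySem

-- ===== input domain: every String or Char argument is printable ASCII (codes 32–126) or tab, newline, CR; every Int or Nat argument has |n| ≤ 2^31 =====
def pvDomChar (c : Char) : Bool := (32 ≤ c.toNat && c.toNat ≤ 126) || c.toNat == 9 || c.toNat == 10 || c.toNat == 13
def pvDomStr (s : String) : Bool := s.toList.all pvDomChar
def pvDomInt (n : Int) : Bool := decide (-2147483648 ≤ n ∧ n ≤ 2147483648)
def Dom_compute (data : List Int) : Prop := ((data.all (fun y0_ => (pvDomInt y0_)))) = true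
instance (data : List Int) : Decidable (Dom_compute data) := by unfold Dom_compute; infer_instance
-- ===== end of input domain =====

-- B re-implements the tree-value computation with a single index cursor into the
-- original list instead of A's repeated list slicing, avoiding the per-node list copies.

-- ===== PORT A =====
-- fuel is a totality device only; fuel = data.length + 1 always suffices because each
-- recursion level consumes two header tokens before descending.
def computeF : Nat → List Int → List Int × Int
  | 0, _ => ([], 0)
  | _+1, [] => ([], 0)
  | _+1, [_] => ([], 0)  -- Python raises ValueError (unpacking) here; outside Pre_
  | f+1, c :: e :: rest =>
    if c = 0 then
      (PySem.List.slice rest (some e) none, (PySem.List.slice rest none (some e)).sum)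
    else
      let p := (List.range c.toNat).foldl
        (fun (p : List Int × List Int) _ => let q := computeF f p.1; (q.1, p.2 ++ [q.2])) (rest, [])
      let md := PySem.List.slice p.1 none (some e)
      let val := ((md.filter (fun i => i ≤ (p.2.length : Int))).map
          (fun i => (PySem.List.pyGet? p.2 (i - 1)).getD 0)).sum
      (PySem.List.slice p.1 (some e) none, val)

def compute (data : List Int) : List Int × Int := computeF (data.length + 1) data

-- ===== PORT B =====
def altF (data : List Int) : Nat → Int → Int × Int
  | 0, _ => ((data.length : Int), 0)  -- fuel junk; unreachable for fuel = length + 1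
  | f+1, i =>
    if (data.length : Int) ≤ i then (i, 0)
    else
      let c := (PySem.List.pyGet? data i).getD 0
      let e := (PySem.List.pyGet? data (i + 1)).getD 0
      let p := (List.range c.toNat).foldl
        (fun (p : Int × List Int) _ => let q := altF data f p.1; (q.1, p.2 ++ [q.2])) (i + 2, [])
      let md := PySem.List.slice data (some p.1) (some (p.1 + e))
      let val := if c = 0 then md.sum
        else ((md.filter (fun j => j ≤ (p.2.length : Int))).map
            (fun j => (PySem.List.pyGet? p.2 (j - 1)).getD 0)).sum
      (p.1 + e, val)

def compute_alt (data : List Int) : List Int × Int :=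
  let p := altF data (data.length + 1) 0
  (PySem.List.slice data (some p.1) none, p.2)

-- ===== PRECONDITION & SPEC =====
-- Shape checker for the serialized tree: parse k nodes, return the leftover suffix;
-- it computes no node values.  The bound (first argument) only makes the recursion
-- structural; data.length + 1 always suffices since every call drops two tokens.
def parseAux : Nat → Nat → List Int → Option (List Int)
  | 0, _, _ => none
  | _+1, 0, l => some l
  | _+1, _+1, [] => some []
  | _+1, _+1, [_] => none
  | b+1, k+1, c :: e :: rest =>
    if e < 0 then none
    else match parseAux b c.toNat rest with
      | none => none
      | some r =>
        if c ≠ 0 ∧ (r.take e.toNat).any (fun j => decide (j ≤ -(c.toNat : Int))) then none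
        else parseAux b k (r.drop e.toNat)

-- Pre_ restricts to the natural domain of the tree format and to non-raising inputs: it
-- excludes truncated serializations (A raises ValueError/IndexError), metadata entries
-- that wrap past the front of the child-value list (A raises IndexError), and nodes with
-- a negative entry count, which is outside the format's natural domain (A reinterprets
-- such a count by negative-slice wraparound; B reads zero metadata there).
def Pre_compute (data : List Int) : Prop := (parseAux (data.length + 1) 1 data).isSome = true
instance (data : List Int) : Decidable (Pre_compute data) := by unfold Pre_compute; infer_instance

def pvWitness_compute : List Int := [2, 3, 0, 3, 10, 11, 12, 1, 1, 0, 1, 99, 2, 1, 1, 2]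

def Spec_compute (data : List Int) (out : List Int × Int) : Prop := out = compute_alt data
instance (data : List Int) (out : List Int × Int) : Decidable (Spec_compute data out) := by unfold Spec_compute; infer_instance

-- ===== CLAIM (what is proved, stated in full; the proofs are below) =====
def Claim_equal_compute : Prop := ∀ (data : List Int), Dom_compute data → Pre_compute data → Spec_compute data (compute data)

-- ===== LEMMAS AND PROOFS =====

lemma computeF_nil (f : Nat) : computeF f [] = ([], 0) := by
  cases f <;> simp [computeF]

lemma foldl_range_succ {α : Type} (g : α → α) (k : Nat) (s : α) :
    (List.range (k+1)).foldl (fun a _ => g a) s = (List.range k).foldl (fun a _ => g a) (g s) := by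
  simp [List.range_succ_eq_map, List.foldl_map]

-- chain of k sibling nodes over an exhausted input: both sides append zeros
lemma nil_chain (data : List Int) (f : Nat) :
    ∀ (k : Nat) (i : Int) (vals0 : List Int), 0 ≤ i → data.drop i.toNat = [] →
    ∃ (w : List Int) (i' : Int),
      (List.range k).foldl (fun (p : List Int × List Int) _ =>
        let q := computeF f p.1; (q.1, p.2 ++ [q.2])) ([], vals0) = ([], vals0 ++ w) ∧
      (List.range k).foldl (fun (p : Int × List Int) _ =>
        let q := altF data f p.1; (q.1, p.2 ++ [q.2])) (i, vals0) = (i', vals0 ++ w) ∧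
      0 ≤ i' ∧ data.drop i'.toNat = [] := by
  intro k
  induction k with
  | zero => intro i vals0 hi hd; exact ⟨[], i, by simp, by simp, hi, hd⟩
  | succ k ih =>
    intro i vals0 hi hd
    have hstepA : computeF f [] = ([], 0) := computeF_nil f
    have hstepB : ∃ i1, altF data f i = (i1, 0) ∧ 0 ≤ i1 ∧ data.drop i1.toNat = [] := by
      cases f with
      | zero => exact ⟨(data.length : Int), rfl, by positivity, by simp⟩
      | succ f =>
        refine ⟨i, ?_, hi, hd⟩
        have hlen : data.length ≤ i.toNat := List.drop_eq_nil_iff.mp hd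
        have : (data.length : Int) ≤ i := by omega
        simp [altF, this]
    obtain ⟨i1, hB, hi1, hd1⟩ := hstepB
    rw [foldl_range_succ, foldl_range_succ]
    simp only [hstepA, hB]
    obtain ⟨w, i', hA', hB', hi', hd'⟩ := ih i1 (vals0 ++ [(0:Int)]) hi1 hd1
    exact ⟨0 :: w, i', by simpa using hA', by simpa using hB', hi', hd'⟩

lemma chain : ∀ (b : Nat), ∀ (k : Nat) (l r : List Int), parseAux b k l = some r →
    ∀ (data : List Int) (i : Int) (f : Nat) (vals0 : List Int),
    0 ≤ i → data.drop i.toNat = l →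
    ∃ (L w : List Int) (i' : Int),
      (List.range k).foldl (fun (p : List Int × List Int) _ =>
        let q := computeF f p.1; (q.1, p.2 ++ [q.2])) (l, vals0) = (L, vals0 ++ w) ∧
      (List.range k).foldl (fun (p : Int × List Int) _ =>
        let q := altF data f p.1; (q.1, p.2 ++ [q.2])) (i, vals0) = (i', vals0 ++ w) ∧
      0 ≤ i' ∧ data.drop i'.toNat = L ∧ (L = r ∨ L = []) := by
  intro b
  induction b with
  | zero => intro k l r h; simp [parseAux] at h
  | succ b ih =>
    intro k l r hp data i f vals0 hi hd
    cases k with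
    | zero =>
      have hr : l = r := by simpa [parseAux] using hp
      exact ⟨l, [], i, by simp, by simp, hi, hd, Or.inl hr⟩
    | succ k =>
      match l with
      | [] =>
        obtain ⟨w, i', hA, hB, hi', hd'⟩ := nil_chain data f (k+1) i vals0 hi hd
        exact ⟨[], w, i', hA, hB, hi', hd', Or.inr rfl⟩
      | [x] => simp [parseAux] at hp
      | c :: e :: rest =>
        simp only [parseAux] at hp
        split at hp
        · exact absurd hp (by simp)
        · rename_i he0
          have he : 0 ≤ e := by omega
          cases hpc : parseAux b c.toNat rest with
          | none => rw [hpc] at hp; exact absurd hp (by simp)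
          | some r0 =>
            rw [hpc] at hp
            split at hp
            · exact absurd hp (by simp)
            · -- match branch: identify the matched value with r0
              rename_i r1 heq1
              obtain rfl : r0 = r1 := Option.some.inj heq1
              split at hp
              · exact absurd hp (by simp)
              -- well-formed node: relate one execution step of both ports, then recurse
              have hlen : data.length - i.toNat = rest.length + 2 := by
                have := congrArg List.length hd; simpa using this
              have hiLt : i.toNat < data.length := by omega
              have hnotle : ¬ (data.length : Int) ≤ i := by omega
              have hgc : (PySem.List.pyGet? data i).getD 0 = c := by
                have h0 : data[i.toNat + 0]? = some c := by
                  rw [← List.getElem?_drop, hd]; rfl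
                rw [PySem.List.pyGet?_of_nonneg data hi]
                simp at h0; rw [h0]; rfl
              have hge : (PySem.List.pyGet? data (i + 1)).getD 0 = e := by
                have h0 : data[i.toNat + 1]? = some e := by
                  rw [← List.getElem?_drop, hd]; rfl
                rw [PySem.List.pyGet?_of_nonneg data (by omega : (0:Int) ≤ i + 1),
                  (by omega : (i + 1).toNat = i.toNat + 1), h0]; rfl
              have hdrop2 : data.drop (i.toNat + 2) = rest := by
                have h2 : List.drop 2 (List.drop i.toNat data) = rest := by rw [hd]; rfl
                rw [List.drop_drop] at h2; simpa [Nat.add_comm] using h2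
              cases f with
              | zero =>
                have hsA : computeF 0 (c :: e :: rest) = ([], 0) := rfl
                have hsB : altF data 0 i = ((data.length : Int), 0) := rfl
                obtain ⟨w, i', hA', hB', hi', hd'⟩ :=
                  nil_chain data 0 k (data.length : Int) (vals0 ++ [(0:Int)])
                    (by positivity) (by simp)
                refine ⟨[], 0 :: w, i', ?_, ?_, hi', hd', Or.inr rfl⟩
                · rw [foldl_range_succ]; simp only [hsA]; simpa using hA'
                · rw [foldl_range_succ]; simp only [hsB]; simpa using hB'
              | succ f =>
                by_cases hc0 : c = 0
                · -- leaf node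
                  have hr0 : r0 = rest := by
                    cases b with
                    | zero => simp [parseAux] at hpc
                    | succ b =>
                      have : some rest = some r0 := by
                        simpa [hc0, parseAux] using hpc
                      exact (Option.some.injEq _ _ ▸ this).symm
                  have hsA : computeF (f+1) (c :: e :: rest) =
                      (rest.drop e.toNat, (rest.take e.toNat).sum) := by
                    simp only [computeF, if_pos hc0]
                    rw [PySem.List.slice_from rest he, PySem.List.slice_to rest he]
                  have hmd : PySem.List.slice data (some (i + 2)) (some (i + 2 + e)) =
                      rest.take e.toNat := by
                    rw [PySem.List.slice_toNat data (by omega) (by omega),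
                      (by omega : (i + 2).toNat = i.toNat + 2), hdrop2,
                      (by omega : (i + 2 + e).toNat = i.toNat + 2 + e.toNat)]
                    congr 1; omega
                  have hsB : altF data (f+1) i = (i + 2 + e, (rest.take e.toNat).sum) := by
                    rw [altF.eq_def]
                    simp only [if_neg hnotle, hgc, hge, hc0]
                    simp only [Int.toNat_zero, List.range_zero, List.foldl_nil, hmd]
                    simp
                  have hdropc : data.drop (i + 2 + e).toNat = rest.drop e.toNat := by
                    rw [(by omega : (i + 2 + e).toNat = (i.toNat + 2) + e.toNat),
                      ← List.drop_drop, hdrop2]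
                  obtain ⟨L, w, i', hA', hB', hi', hd', hdisj⟩ :=
                    ih k (r0.drop e.toNat) r hp data (i + 2 + e) (f+1)
                      (vals0 ++ [(rest.take e.toNat).sum]) (by omega)
                      (by rw [hdropc, hr0])
                  refine ⟨L, (rest.take e.toNat).sum :: w, i', ?_, ?_, hi', hd', hdisj⟩
                  · rw [foldl_range_succ]; simp only [hsA]
                    rw [hr0] at hA'
                    simpa [List.append_assoc] using hA'
                  · rw [foldl_range_succ]; simp only [hsB]
                    simpa [List.append_assoc] using hB'
                · -- internal node: children first (fuel f), then metadata
                  obtain ⟨Lc, wc, i3, hcA, hcB, hi3, hd3, hLc⟩ :=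
                    ih c.toNat rest r0 hpc data (i + 2) f []
                      (by omega) (by rw [(by omega : (i + 2).toNat = i.toNat + 2)]; exact hdrop2)
                  simp only [List.nil_append] at hcA hcB
                  have hmdB : PySem.List.slice data (some i3) (some (i3 + e)) =
                      Lc.take e.toNat := by
                    rw [PySem.List.slice_toNat data hi3 (by omega),
                      (by omega : (i3 + e).toNat = i3.toNat + e.toNat), hd3]
                    congr 1; omega
                  have hsA : computeF (f+1) (c :: e :: rest) =
                      (Lc.drop e.toNat,
                       (((Lc.take e.toNat).filter (fun j => j ≤ (wc.length : Int))).map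
                         (fun j => (PySem.List.pyGet? wc (j - 1)).getD 0)).sum) := by
                    simp only [computeF, if_neg hc0, hcA]
                    rw [PySem.List.slice_from Lc he, PySem.List.slice_to Lc he]
                  have hsB : altF data (f+1) i =
                      (i3 + e,
                       (((Lc.take e.toNat).filter (fun j => j ≤ (wc.length : Int))).map
                         (fun j => (PySem.List.pyGet? wc (j - 1)).getD 0)).sum) := by
                    rw [altF.eq_def]
                    simp only [if_neg hnotle, hgc, hge, hcB, hmdB, if_neg hc0]
                  have hdropc : data.drop (i3 + e).toNat = Lc.drop e.toNat := by
                    rw [(by omega : (i3 + e).toNat = i3.toNat + e.toNat),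
                      ← List.drop_drop, hd3]
                  set v := (((Lc.take e.toNat).filter (fun j => j ≤ (wc.length : Int))).map
                    (fun j => (PySem.List.pyGet? wc (j - 1)).getD 0)).sum with hv
                  rcases hLc with hLr | hLnil
                  · obtain ⟨L, w, i', hA', hB', hi', hd', hdisj⟩ :=
                      ih k (r0.drop e.toNat) r hp data (i3 + e) (f+1)
                        (vals0 ++ [v]) (by omega) (by rw [hdropc, hLr])
                    refine ⟨L, v :: w, i', ?_, ?_, hi', hd', hdisj⟩
                    · rw [foldl_range_succ]; simp only [hsA]
                      rw [← hLr] at hA'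
                      simpa [List.append_assoc] using hA'
                    · rw [foldl_range_succ]; simp only [hsB]
                      simpa [List.append_assoc] using hB'
                  · obtain ⟨w, i', hA', hB', hi', hd'⟩ :=
                      nil_chain data (f+1) k (i3 + e) (vals0 ++ [v]) (by omega)
                        (by rw [hdropc, hLnil]; simp)
                    refine ⟨[], v :: w, i', ?_, ?_, hi', hd', Or.inr rfl⟩
                    · rw [foldl_range_succ]; simp only [hsA, hLnil, List.drop_nil]
                      simpa [List.append_assoc] using hA'
                    · rw [foldl_range_succ]; simp only [hsB]
                      simpa [List.append_assoc] using hB'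

-- ===== VERDICT (by name: the statement is the Claim_ definition above) =====
theorem compute_spec : Claim_equal_compute := by
  intro data _ hpre
  unfold Spec_compute
  obtain ⟨r, hr⟩ := Option.isSome_iff_exists.mp hpre
  obtain ⟨L, w, i', hA, hB, hi', hd', _⟩ :=
    chain (data.length + 1) 1 data r hr data 0 (data.length + 1) [] le_rfl (by simp)
  simp only [List.range_one, List.foldl_cons, List.foldl_nil, List.nil_append,
    Prod.mk.injEq] at hA hB
  show computeF (data.length + 1) data =
    (PySem.List.slice data (some (altF data (data.length + 1) 0).1),
     (altF data (data.length + 1) 0).2)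
  rw [hB.1, PySem.List.slice_from data hi', hd']
  have hv : (computeF (data.length + 1) data).2 = (altF data (data.length + 1) 0).2 := by
    have := hA.2.trans hB.2.symm
    simpa using this
  exact Prod.ext hA.1 hv
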